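-- pv_equiv track=rewrite | github.com/bms63/metsci | scripts/inspect_union_transfer.py | find_text_matches
-- ===== SOURCE A (Python) =====
-- def find_text_matches(text: str, needle: str, context: int = 140) -> list[str]:
--     if not needle:
--         return []
--
--     lowered = text.lower()
--     target = needle.lower()
--     start = 0
--     snippets: list[str] = []
--
--     while True:
--         idx = lowered.find(target, start)
--         if idx < 0:
--             break
--         left = max(0, idx - context)
--         right = min(len(text), idx + len(needle) + context)
--         snippets.append(text[left:right].strip())
--         start = idx + len(target)
--
--     return snippets
-- ===== SOURCE B (Python) =====
-- def find_text_matches(text: str, needle: str, context: int = 140) -> list[str]: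
--     if not needle:
--         return []
--     lowered = text.lower()
--     target = needle.lower()
--     # candidate phase: every position where the lowered target occurs
--     starts = [i for i in range(len(lowered)) if lowered[i:i + len(target)] == target]
--     # greedy non-overlapping selection
--     picked = []
--     end = 0
--     for i in starts:
--         if i >= end:
--             picked.append(i)
--             end = i + len(target)
--     return [text[max(0, i - context):min(len(text), i + len(needle) + context)].strip()
--             for i in picked]
-- ===== Notes on version B (the rewrite author's own statement) =====
-- stated objective: alternative
-- what changed: Replaces the while-loop of str.find calls with manual start advancement by three separate phases: a comprehension collecting every occurrence position by direct slice comparison, a greedy fold selecting non-overlapping ones, and a map producing the snippets.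
import Mathlib
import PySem

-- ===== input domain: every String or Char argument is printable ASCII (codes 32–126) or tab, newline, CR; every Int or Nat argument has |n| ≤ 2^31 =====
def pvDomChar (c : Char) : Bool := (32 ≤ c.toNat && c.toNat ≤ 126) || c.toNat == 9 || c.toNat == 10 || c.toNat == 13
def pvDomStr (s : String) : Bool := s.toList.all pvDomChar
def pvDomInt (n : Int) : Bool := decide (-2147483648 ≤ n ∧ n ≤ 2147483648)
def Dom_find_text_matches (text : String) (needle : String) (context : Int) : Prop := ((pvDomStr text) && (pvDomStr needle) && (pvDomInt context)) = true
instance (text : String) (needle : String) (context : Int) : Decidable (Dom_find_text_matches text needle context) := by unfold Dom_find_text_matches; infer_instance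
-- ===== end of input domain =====

-- B replaces A's while/str.find scanning loop by three phases (collect all occurrence
-- positions by slice comparison, greedy fold picking non-overlapping ones, map to
-- snippets); same cost, alternative structure. Proven equal on all inputs.

-- ===== PORT A =====
-- the while-loop; fuel only makes the same computation total (lowered.length+1 always suffices)
def loopA (textL low tgt : List Char) (nlen : Nat) (context : Int) : Nat → Nat → List String
  | 0, _ => []
  | fuel+1, start =>
    let idx := PySem.Chars.findFrom low tgt (start : Int)
    if idx < 0 then []
    else
      let left := max 0 (idx - context)
      let right := min ((textL.length : Int)) (idx + (nlen : Int) + context)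
      String.ofList (PySem.Chars.strip (PySem.List.slice textL (some left) (some right)))
        :: loopA textL low tgt nlen context fuel (idx.toNat + tgt.length)

def find_text_matches (text : String) (needle : String) (context : Int) : List String :=
  if needle.toList = [] then []
  else
    let textL := text.toList
    let lowered := PySem.Chars.lower textL
    let target := PySem.Chars.lower needle.toList
    loopA textL lowered target needle.toList.length context (lowered.length + 1) 0

-- ===== PORT B =====
-- one step of B's greedy selection loop: state = (picked, end)
def stepB (tlen : Nat) (st : List Nat × Nat) (i : Nat) : List Nat × Nat :=
  if st.2 ≤ i then (st.1 ++ [i], i + tlen) else st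

-- body of B's final comprehension: text[max(0,i-context):min(len(text),i+len(needle)+context)].strip()
def snippetB (textL : List Char) (nlen : Nat) (context : Int) (i : Nat) : String :=
  String.ofList (PySem.Chars.strip (PySem.List.slice textL
    (some (max 0 ((i : Int) - context)))
    (some (min ((textL.length : Int)) ((i : Int) + (nlen : Int) + context)))))

def find_text_matches_alt (text : String) (needle : String) (context : Int) : List String :=
  if needle.toList = [] then []
  else
    let textL := text.toList
    let lowered := PySem.Chars.lower textL
    let target := PySem.Chars.lower needle.toList
    let starts := (List.range lowered.length).filter
      (fun (i : Nat) => PySem.List.slice lowered (some (i : Int)) (some ((i : Int) + (target.length : Int))) == target)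
    let picked := (starts.foldl (stepB target.length) ([], 0)).1
    picked.map (snippetB textL needle.toList.length context)

-- ===== PRECONDITION & SPEC =====
def Spec_find_text_matches (text : String) (needle : String) (context : Int) (out : List String) : Prop := out = find_text_matches_alt text needle context
instance (text : String) (needle : String) (context : Int) (out : List String) : Decidable (Spec_find_text_matches text needle context out) := by unfold Spec_find_text_matches; infer_instance

-- ===== CLAIM (what is proved, stated in full; the proofs are below) =====
def Claim_equal_find_text_matches : Prop := ∀ (text : String) (needle : String) (context : Int), Dom_find_text_matches text needle context → Spec_find_text_matches text needle context (find_text_matches text needle context)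

-- ===== LEMMAS AND PROOFS =====

-- B's occurrence test is "tgt is a prefix of low.drop i"
lemma sliceTest_iff (low tgt : List Char) (i : Nat) :
    ((PySem.List.slice low (some (i : Int)) (some ((i : Int) + (tgt.length : Int))) == tgt) = true)
      ↔ tgt <+: low.drop i := by
  rw [PySem.List.slice_natCast_add, beq_iff_eq, List.prefix_iff_eq_take]
  constructor <;> intro h <;> exact h.symm

lemma occ_bound (low tgt : List Char) (i : Nat) (h : tgt <+: low.drop i) (hne : tgt ≠ []) :
    i + tgt.length ≤ low.length := by
  have h1 := h.length_le
  have h2 : 0 < tgt.length := List.length_pos_of_ne_nil hne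
  simp [List.length_drop] at h1
  omega

lemma foldl_skip (tlen : Nat) : ∀ (L : List Nat) (acc : List Nat × Nat),
    (∀ i ∈ L, i < acc.2) → L.foldl (stepB tlen) acc = acc := by
  intro L
  induction L with
  | nil => intro acc _; rfl
  | cons a L ih =>
    intro acc h
    have ha := h a (by simp)
    rw [List.foldl_cons, show stepB tlen acc a = acc by unfold stepB; rw [if_neg (by omega)]]
    exact ih acc (fun i hi => h i (by simp [hi]))

lemma foldl_acc (tlen : Nat) : ∀ (L : List Nat) (a : List Nat) (e : Nat),
    L.foldl (stepB tlen) (a, e)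
      = (a ++ (L.foldl (stepB tlen) ([], e)).1, (L.foldl (stepB tlen) ([], e)).2) := by
  intro L
  induction L with
  | nil => intro a e; simp
  | cons i L ih =>
    intro a e
    by_cases h : e ≤ i
    · simp only [List.foldl_cons, stepB, if_pos h, List.nil_append]
      rw [ih (a ++ [i]) (i + tlen), ih [i] (i + tlen)]
      simp
    · simp only [List.foldl_cons, stepB, if_neg h]
      exact ih a e

-- the main invariant: A's loop from position s equals B's fold with threshold s
lemma main_inv (textL low tgt : List Char) (nlen : Nat) (ctx : Int) (hne : tgt ≠ []) :
    ∀ (fuel s : Nat), s ≤ low.length → low.length + 1 - s ≤ fuel →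
    loopA textL low tgt nlen ctx fuel s
      = ((((List.range low.length).filter
            (fun (i : Nat) => PySem.List.slice low (some (i : Int)) (some ((i : Int) + (tgt.length : Int))) == tgt)).foldl
            (stepB tgt.length) ([], s)).1).map (snippetB textL nlen ctx) := by
  intro fuel
  induction fuel with
  | zero => intro s hs hf; omega
  | succ fuel ih =>
    intro s hs hf
    set p := (fun (i : Nat) => PySem.List.slice low (some (i : Int)) (some ((i : Int) + (tgt.length : Int))) == tgt) with hp
    have hmem : ∀ i, p i = true ↔ tgt <+: low.drop i := fun i => sliceTest_iff low tgt i
    by_cases hF : PySem.Chars.findFrom low tgt (s : Int) = -1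
    · -- no further occurrence: loop stops, fold skips everything
      have hno : ∀ i, s ≤ i → ¬ tgt <+: low.drop i := by
        intro i hi hpre
        rw [PySem.Chars.findFrom_natCast_eq_neg_one_iff low tgt s hs] at hF
        apply hF
        have h1 : low.drop i = (low.drop s).drop (i - s) := by
          rw [List.drop_drop]; congr 1; omega
        rw [h1] at hpre
        exact hpre.isInfix.trans (List.drop_suffix (i - s) (low.drop s)).isInfix
      have hz : ((List.range low.length).filter p).foldl (stepB tgt.length) ([], s) = ([], s) := by
        apply foldl_skip
        intro i hi
        simp only [List.mem_filter, List.mem_range] at hi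
        have := (hmem i).mp hi.2
        by_contra hc
        exact hno i (by omega) this
      simp [loopA, hF, hz]
    · -- occurrence found at j = idx.toNat
      have hspec := PySem.Chars.findFrom_natCast_spec low tgt s hs hF
      set F := PySem.Chars.findFrom low tgt (s : Int) with hFdef
      obtain ⟨hge, hpre, hmin⟩ := hspec
      have hF0 : 0 ≤ F := le_trans (by positivity) hge
      set j := F.toNat with hj
      have hFj : F = (j : Int) := (Int.toNat_of_nonneg hF0).symm
      have hsj : s ≤ j := by omega
      have hjb : j + tgt.length ≤ low.length := occ_bound low tgt j hpre hne
      have htl : 0 < tgt.length := List.length_pos_of_ne_nil hne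
      -- split the range at j
      have hsplit : List.range low.length
          = List.range' 0 j ++ j :: List.range' (j+1) (low.length - j - 1) := by
        rw [List.range_eq_range']
        have h1 : low.length = j + (low.length - j) := by omega
        conv_lhs => rw [h1]
        rw [← List.range'_append]
        simp only [Nat.zero_add, Nat.one_mul]
        congr 1
        have h2 : low.length - j = (low.length - j - 1) + 1 := by omega
        conv_lhs => rw [h2]
        rw [List.range'_succ]
      have hL1 : ∀ i ∈ (List.range' 0 j).filter p, i < s := by
        intro i hi
        simp only [List.mem_filter, List.mem_range'_1] at hi
        have hocc := (hmem i).mp hi.2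
        by_contra hc
        exact hmin i (by omega) (by omega) hocc
      have hpj : p j = true := (hmem j).mpr hpre
      have hstep : stepB tgt.length ([], s) j = ([j], j + tgt.length) := by
        unfold stepB; rw [if_pos (by exact hsj)]; rfl
      -- compute the fold with threshold s
      have hfold : (((List.range low.length).filter p).foldl (stepB tgt.length) ([], s))
          = (j :: ((((List.range' (j+1) (low.length - j - 1)).filter p).foldl (stepB tgt.length) ([], j + tgt.length)).1),
             (((List.range' (j+1) (low.length - j - 1)).filter p).foldl (stepB tgt.length) ([], j + tgt.length)).2) := by
        rw [hsplit, List.filter_append, List.foldl_append,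
            foldl_skip tgt.length ((List.range' 0 j).filter p) ([], s) hL1,
            List.filter_cons_of_pos hpj, List.foldl_cons, hstep,
            foldl_acc tgt.length _ [j] (j + tgt.length)]
        simp
      -- and with threshold j + tgt.length the first part is skipped too
      have hstep2 : stepB tgt.length ([], j + tgt.length) j = ([], j + tgt.length) := by
        unfold stepB; rw [if_neg (by omega)]
      have hfold2 : (((List.range low.length).filter p).foldl (stepB tgt.length) ([], j + tgt.length))
          = (((List.range' (j+1) (low.length - j - 1)).filter p).foldl (stepB tgt.length) ([], j + tgt.length)) := by
        rw [hsplit, List.filter_append, List.foldl_append,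
            foldl_skip tgt.length ((List.range' 0 j).filter p) ([], j + tgt.length)
              (fun i hi => by have := hL1 i hi; omega),
            List.filter_cons_of_pos hpj, List.foldl_cons, hstep2]
      have hih := ih (j + tgt.length) hjb (by omega)
      rw [hfold2] at hih
      -- unfold one step of the loop
      show (if F < 0 then []
        else String.ofList (PySem.Chars.strip (PySem.List.slice textL (some (max 0 (F - ctx)))
              (some (min ((textL.length : Int)) (F + (nlen : Int) + ctx)))))
          :: loopA textL low tgt nlen ctx fuel (F.toNat + tgt.length)) = _
      rw [if_neg (by omega), hfold]
      simp only [List.map_cons]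
      exact congrArg₂ List.cons (by rw [hFj]; rfl) hih

lemma lower_ne_nil (l : List Char) (h : l ≠ []) : PySem.Chars.lower l ≠ [] := by
  have : (PySem.Chars.lower l).length = l.length := by simp [PySem.Chars.lower]
  intro hc
  rw [hc] at this
  exact h (List.eq_nil_of_length_eq_zero this.symm)

-- ===== VERDICT (by name: the statement is the Claim_ definition above) =====
theorem find_text_matches_spec : Claim_equal_find_text_matches := by
  intro text needle context _
  unfold Spec_find_text_matches find_text_matches find_text_matches_alt
  by_cases h : needle.toList = []
  · simp [h]
  · simp only [if_neg h]
    exact main_inv text.toList (PySem.Chars.lower text.toList) (PySem.Chars.lower needle.toList)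
      needle.toList.length context (lower_ne_nil _ h) (PySem.Chars.lower text.toList).length.succ 0
      (Nat.zero_le _) (by omega)
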